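-- pv_equiv track=rewrite | github.com/Garhiou/algorithm_and_data_structure | l_test_algo.py | check
-- ===== SOURCE A (Python) =====
-- def check(word: str) -> bool:
--     #check if word is empty
--     if len(word) == 0:
--         return False
--
--     # check if the word contains only 0 and 1
--     for char in word:
--         if char not in ("0", "1"):
--             return False
--
--     # check if the word has the form 0^n 1^n
--     seen_one = False
--     count_0 = 0
--     count_1 = 0
--
--     # check
--     for char in word:
--         if char == "0":
--             if seen_one:
--                 return False
--             count_0 += 1
--         else:
--             seen_one = True
--             count_1 += 1
--     if count_0 == count_1 and count_0 > 0:
--         return True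
--     else:
--         return False
-- ===== SOURCE B (Python) =====
-- def check(word: str) -> bool:
--     n = len(word)
--     if n == 0 or n % 2 == 1:
--         return False
--     m = n // 2
--     return word == "0" * m + "1" * m  # canonical target
-- ===== Notes on version B (the rewrite author's own statement) =====
-- stated objective: simpler
-- what changed: Replaces the validation loop plus flag/counter scan with a single comparison against the canonically built target string of m zeros followed by m ones, after even-length and non-empty guards.
import Mathlib
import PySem

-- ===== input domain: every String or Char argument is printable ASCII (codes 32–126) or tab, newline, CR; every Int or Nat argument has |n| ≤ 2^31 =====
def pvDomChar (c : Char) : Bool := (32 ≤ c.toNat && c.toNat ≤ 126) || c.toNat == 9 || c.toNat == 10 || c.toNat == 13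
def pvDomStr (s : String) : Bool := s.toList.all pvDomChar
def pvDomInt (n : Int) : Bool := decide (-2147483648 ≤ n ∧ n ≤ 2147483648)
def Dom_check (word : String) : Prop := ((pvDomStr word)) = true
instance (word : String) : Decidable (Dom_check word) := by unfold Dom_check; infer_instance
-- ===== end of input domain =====

-- B replaces A's validation loop and flag/counter scan with one comparison against the
-- canonically built target string (m zeros then m ones) after empty/odd-length guards; same O(n) cost, simpler.


-- ===== PORT A =====
-- the second loop of A: state (seen_one, count_0, count_1), early 'return False' as result false
def checkLoop : List Char → Bool → Int → Int → Bool
  | [], _, c0, c1 => if c0 = c1 ∧ c0 > 0 then true else false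
  | c :: rest, seen, c0, c1 =>
    if c = '0' then
      if seen then false else checkLoop rest seen (c0 + 1) c1
    else checkLoop rest true c0 (c1 + 1)

def check (word : String) : Bool :=
  if PySem.Str.len word = 0 then false
  else if word.toList.all (fun c => c == '0' || c == '1') then
    checkLoop word.toList false 0 0
  else false

-- ===== PORT B =====
def check_alt (word : String) : Bool :=
  -- n = len(word); m = n // 2; word == "0"*m + "1"*m (string equality on the character lists)
  if PySem.Str.len word = 0 || PySem.Int.mod (PySem.Str.len word) 2 = 1 then false
  else
    word.toList ==
      List.replicate (PySem.Int.floordiv (PySem.Str.len word) 2).toNat '0' ++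
        List.replicate (PySem.Int.floordiv (PySem.Str.len word) 2).toNat '1'

-- ===== PRECONDITION & SPEC =====
def Spec_check (word : String) (out : Bool) : Prop := out = check_alt word
instance (word : String) (out : Bool) : Decidable (Spec_check word out) := by unfold Spec_check; infer_instance

-- ===== CLAIM (what is proved, stated in full; the proofs are below) =====
def Claim_equal_check : Prop := ∀ (word : String), Dom_check word → Spec_check word (check word)

-- ===== LEMMAS AND PROOFS =====

-- once seen_one is set, A's loop succeeds iff the rest has no '0' and the counts balance
theorem loop_true (cs : List Char) : ∀ (c0 c1 : Int),
    checkLoop cs true c0 c1 =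
      (cs.all (fun c => !(c == '0')) && decide (c0 = c1 + cs.length ∧ 0 < c0)) := by
  induction cs with
  | nil => intro c0 c1; simp [checkLoop]
  | cons c rest ih =>
    intro c0 c1
    by_cases h : c = '0'
    · simp [checkLoop, h]
    · have hb : (c == '0') = false := by simp [h]
      simp only [checkLoop, if_neg h, ih, List.all_cons, hb, Bool.not_false, Bool.true_and,
        List.length_cons]
      congr 1
      rw [decide_eq_decide]
      push_cast
      omega

-- A's loop from the initial state, characterised by the takeWhile/dropWhile split at the first non-'0'
theorem loop_false (cs : List Char) : ∀ (c0 c1 : Int),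
    checkLoop cs false c0 c1 =
      ((cs.dropWhile (fun c => c == '0')).all (fun c => !(c == '0')) &&
        decide (c0 + (cs.takeWhile (fun c => c == '0')).length
                  = c1 + (cs.dropWhile (fun c => c == '0')).length ∧
                0 < c0 + (cs.takeWhile (fun c => c == '0')).length)) := by
  induction cs with
  | nil => intro c0 c1; simp [checkLoop]
  | cons c rest ih =>
    intro c0 c1
    by_cases h : c = '0'
    · have hb : (c == '0') = true := by simp [h]
      simp only [checkLoop, if_pos h, if_neg (by simp : ¬ (false = true)), ih,
        List.takeWhile_cons, List.dropWhile_cons, hb, if_true,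
        List.length_cons]
      congr 1
      rw [decide_eq_decide]
      push_cast
      omega
    · have hb : (c == '0') = false := by simp [h]
      simp only [checkLoop, if_neg h, loop_true, List.takeWhile_cons, List.dropWhile_cons, hb,
        if_neg (by simp : ¬ (false = true)), List.all_cons, Bool.not_false, Bool.true_and,
        List.length_cons, List.length_nil]
      congr 1
      rw [decide_eq_decide]
      push_cast
      omega

-- on a non-empty binary word, A's loop succeeds iff the word IS the canonical 0^m 1^m string
theorem key (cs : List Char) (hne : cs ≠ []) (hbin : ∀ c ∈ cs, c = '0' ∨ c = '1') :
    (checkLoop cs false 0 0 = true ↔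
      cs.length % 2 ≠ 1 ∧
        cs = List.replicate (cs.length / 2) '0' ++ List.replicate (cs.length / 2) '1') := by
  rw [loop_false]
  have hzr : cs.takeWhile (fun c => c == '0') ++ cs.dropWhile (fun c => c == '0') = cs :=
    List.takeWhile_append_dropWhile
  simp only [Bool.and_eq_true, List.all_eq_true, decide_eq_true_eq, zero_add]
  constructor
  · rintro ⟨hall, hlen, hpos⟩
    have hzl : (cs.takeWhile (fun c => c == '0')).length
        = (cs.dropWhile (fun c => c == '0')).length := by exact_mod_cast hlen
    have hzpos : 0 < (cs.takeWhile (fun c => c == '0')).length := by exact_mod_cast hpos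
    have hz0 : ∀ x ∈ cs.takeWhile (fun c => c == '0'), x = '0' := by
      intro x hx
      simpa using List.mem_takeWhile_imp hx
    have hr1 : ∀ x ∈ cs.dropWhile (fun c => c == '0'), x = '1' := by
      intro x hx
      have hb := hbin x (by rw [← hzr]; exact List.mem_append_right _ hx)
      have hx0 := hall x hx
      rcases hb with h | h
      · simp [h] at hx0
      · exact h
    have hz : cs.takeWhile (fun c => c == '0')
        = List.replicate (cs.takeWhile (fun c => c == '0')).length '0' :=
      List.eq_replicate_length.mpr hz0
    have hr : cs.dropWhile (fun c => c == '0')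
        = List.replicate (cs.dropWhile (fun c => c == '0')).length '1' :=
      List.eq_replicate_length.mpr hr1
    have hlencs : cs.length = 2 * (cs.takeWhile (fun c => c == '0')).length := by
      have h := congrArg List.length hzr
      simp only [List.length_append] at h
      omega
    refine ⟨by omega, ?_⟩
    conv_lhs => rw [← hzr]
    rw [hz, hr]
    congr 1 <;> congr 1 <;> omega
  · rintro ⟨hodd, heq⟩
    have hn0 : cs.length ≠ 0 := fun h => hne (List.length_eq_zero_iff.mp h)
    have hm : 0 < cs.length / 2 := by omega
    have hz : cs.takeWhile (fun c => c == '0') = List.replicate (cs.length / 2) '0' := by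
      conv_lhs => rw [heq]
      rw [List.takeWhile_append_of_pos
        (by intro x hx; simp [List.eq_of_mem_replicate hx])]
      simp
    have hr : cs.dropWhile (fun c => c == '0') = List.replicate (cs.length / 2) '1' := by
      conv_lhs => rw [heq]
      rw [List.dropWhile_append_of_pos
        (by intro x hx; simp [List.eq_of_mem_replicate hx])]
      simp
    refine ⟨?_, ?_, ?_⟩
    · intro x hx
      rw [hr] at hx
      simp [List.eq_of_mem_replicate hx]
    · rw [hz, hr]; simp
    · rw [hz]; simp; omega

-- the canonical string is binary
theorem rep_binary (m : Nat) (c : Char)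
    (hc : c ∈ List.replicate m '0' ++ List.replicate m '1') : c = '0' ∨ c = '1' := by
  rcases List.mem_append.mp hc with h | h
  · exact Or.inl (List.eq_of_mem_replicate h)
  · exact Or.inr (List.eq_of_mem_replicate h)

-- ===== VERDICT (by name: the statement is the Claim_ definition above) =====
theorem check_spec : Claim_equal_check := by
  intro word _
  unfold Spec_check check check_alt
  rw [PySem.Str.len_eq, show (2 : Int) = ((2 : Nat) : Int) from rfl,
    PySem.Int.mod_natCast, PySem.Int.floordiv_natCast, Int.toNat_natCast]
  by_cases h0 : word.toList = []
  · have hz : (word.toList.length : Int) = 0 := by rw [h0]; rfl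
    rw [hz, if_pos rfl]
    simp
  · have hne : (word.toList.length : Int) ≠ 0 := by
      intro h
      exact h0 (List.length_eq_zero_iff.mp (by exact_mod_cast h))
    rw [if_neg hne]
    have hd0 : decide ((word.toList.length : Int) = 0) = false := decide_eq_false hne
    rw [hd0, Bool.false_or]
    by_cases hodd : word.toList.length % 2 = 1
    · have hd1 : decide (((word.toList.length % 2 : Nat) : Int) = 1) = true :=
        decide_eq_true (by exact_mod_cast hodd)
      rw [hd1, if_pos rfl]
      cases hb : word.toList.all (fun c => c == '0' || c == '1') with
      | true =>
        rw [if_pos rfl, ← Bool.not_eq_true]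
        intro hcl
        have hbin : ∀ c ∈ word.toList, c = '0' ∨ c = '1' := by
          intro x hx
          simpa using List.all_eq_true.mp hb x hx
        exact ((key word.toList h0 hbin).mp hcl).1 hodd
      | false => rw [if_neg (by simp)]
    · have hd1 : decide (((word.toList.length % 2 : Nat) : Int) = 1) = false :=
        decide_eq_false (fun h => hodd (by exact_mod_cast h))
      rw [hd1, if_neg (show ¬ (false = true) by simp)]
      cases hb : word.toList.all (fun c => c == '0' || c == '1') with
      | true =>
        have hbin : ∀ c ∈ word.toList, c = '0' ∨ c = '1' := by
          intro x hx
          simpa using List.all_eq_true.mp hb x hx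
        rw [if_pos rfl, Bool.eq_iff_iff, beq_iff_eq, key word.toList h0 hbin]
        exact ⟨fun h => h.2, fun h => ⟨hodd, h⟩⟩
      | false =>
        rw [if_neg (show ¬ (false = true) by simp), eq_comm, Bool.eq_iff_iff]
        simp only [beq_iff_eq]
        constructor
        · intro heq
          have hall : word.toList.all (fun c => c == '0' || c == '1') = true := by
            refine List.all_eq_true.mpr (fun x hx => ?_)
            rcases rep_binary _ x (heq ▸ hx) with h | h <;> simp [h]
          rw [hb] at hall
          exact absurd hall (by simp)
        · intro h
          exact absurd h (by simp)
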